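-- pv_equiv track=rewrite | github.com/ryanhuang8/AdaptLM | backend/classifier/model_classifier.py | preprocess_model_categories
-- ===== SOURCE A (Python) =====
-- def preprocess_model_categories(model_categories: dict) -> dict:
--     """
--     Convert Vellum leaderboard data to category_to_model_family mapping.
--     Analyzes the top models in each category to determine the dominant model family.
--     """
--     category_to_model_family = {}
--
--     # Define model family patterns
--     model_family_patterns = {
--         "gemini": ["gemini", "google"],
--         "gpt": ["gpt", "openai", "o3", "o4"],
--         "claude": ["claude", "anthropic"],
--         "groq": ["groq", "llama"]
--     }
--
--     for category, models in model_categories.items():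
--         # Count model families in this category
--         model_family = None
--
--         for model in models:
--             model_lower = model.lower()
--             for family, patterns in model_family_patterns.items():
--                 if any(pattern in model_lower for pattern in patterns):
--                     model_family = family
--                     break
--
--         # Determine the dominant model family
--         if model_family:
--             category_to_model_family[category] = model_family
--         else:
--             # Default to gemini if no clear pattern
--             category_to_model_family[category] = "gemini"
--     return category_to_model_family
-- ===== SOURCE B (Python) =====
-- MODEL_FAMILY_PATTERNS = {
--     "gemini": ["gemini", "google"],
--     "gpt": ["gpt", "openai", "o3", "o4"],
--     "claude": ["claude", "anthropic"],
--     "groq": ["groq", "llama"],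
-- }
--
--
-- def _family_of(model):
--     """Return the first family (in fixed dict order) any of whose patterns
--     occurs in the lowercased model name, or None."""
--     m = model.lower()
--     for family, patterns in MODEL_FAMILY_PATTERNS.items():
--         if any(p in m for p in patterns):
--             return family
--     return None
--
--
-- def preprocess_model_categories(model_categories: dict) -> dict:
--     result = {}
--     for category, models in model_categories.items():
--         # last matching model wins: scan in reverse and stop at the first hit
--         result[category] = next(
--             (f for f in map(_family_of, reversed(models)) if f is not None),
--             "gemini",
--         )
--     return result
-- ===== Notes on version B (the rewrite author's own statement) =====
-- stated objective: simpler
-- what changed: Per-model family detection is factored into a helper returning family-or-None, and the per-category overwrite scan over all models is replaced by an early-terminating reverse scan that stops at the first (i.e. last-in-order) matching model.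
import Mathlib
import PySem

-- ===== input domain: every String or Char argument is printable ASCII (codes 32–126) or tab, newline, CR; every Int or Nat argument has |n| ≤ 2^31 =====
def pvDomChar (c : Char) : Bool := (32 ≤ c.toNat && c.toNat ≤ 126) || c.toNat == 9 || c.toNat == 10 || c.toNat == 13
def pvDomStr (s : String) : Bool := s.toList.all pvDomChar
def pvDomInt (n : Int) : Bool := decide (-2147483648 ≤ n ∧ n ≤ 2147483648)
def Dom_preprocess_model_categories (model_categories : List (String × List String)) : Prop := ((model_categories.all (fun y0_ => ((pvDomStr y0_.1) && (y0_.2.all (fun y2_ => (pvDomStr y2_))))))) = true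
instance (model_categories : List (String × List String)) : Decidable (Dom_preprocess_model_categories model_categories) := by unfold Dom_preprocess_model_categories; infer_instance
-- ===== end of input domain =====

-- B factors per-model family detection into a helper and replaces A's per-category
-- overwrite scan by an early-terminating reverse scan (objective: simpler).

-- ===== PORT A =====
def pvModelFamilyPatterns : List (String × List String) :=
  [("gemini", ["gemini", "google"]),
   ("gpt", ["gpt", "openai", "o3", "o4"]),
   ("claude", ["claude", "anthropic"]),
   ("groq", ["groq", "llama"])]

def preprocess_model_categories (model_categories : List (String × List String)) : List (String × String) :=
  (model_categories.foldl
    (fun (d : PySem.Dict String String) cm =>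
      -- inner 'for model in models' loop with the family loop-with-break inside
      let model_family :=
        cm.2.foldl (fun (mf : Option String) model =>
          let model_lower := PySem.Str.lower model
          match pvModelFamilyPatterns.find?
              (fun fp => fp.2.any (fun p => PySem.Str.isIn p model_lower)) with
          | some fp => some fp.1
          | none => mf) none
      match model_family with
      | some f => d.insert cm.1 f
      | none => d.insert cm.1 "gemini")
    PySem.Dict.empty).items

-- ===== PORT B =====
def pvBPatterns : List (String × List String) :=
  [("gemini", ["gemini", "google"]),
   ("gpt", ["gpt", "openai", "o3", "o4"]),
   ("claude", ["claude", "anthropic"]),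
   ("groq", ["groq", "llama"])]

def pvFamilyOf (model : String) : Option String :=
  let m := PySem.Str.lower model
  (pvBPatterns.find? (fun fp => fp.2.any (fun p => PySem.Str.isIn p m))).map Prod.fst

def preprocess_model_categories_alt (model_categories : List (String × List String)) : List (String × String) :=
  (model_categories.foldl
    (fun (d : PySem.Dict String String) cm =>
      -- next((f for f in map(_family_of, reversed(models)) if f is not None), "gemini")
      d.insert cm.1 ((cm.2.reverse.findSome? pvFamilyOf).getD "gemini"))
    PySem.Dict.empty).items

-- ===== PRECONDITION & SPEC =====
def Spec_preprocess_model_categories (model_categories : List (String × List String)) (out : List (String × String)) : Prop := out = preprocess_model_categories_alt model_categories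
instance (model_categories : List (String × List String)) (out : List (String × String)) : Decidable (Spec_preprocess_model_categories model_categories out) := by unfold Spec_preprocess_model_categories; infer_instance

-- ===== CLAIM (what is proved, stated in full; the proofs are below) =====
def Claim_equal_preprocess_model_categories : Prop := ∀ (model_categories : List (String × List String)), Dom_preprocess_model_categories model_categories → Spec_preprocess_model_categories model_categories (preprocess_model_categories model_categories)

-- ===== LEMMAS AND PROOFS =====

-- A's overwrite scan starting from acc equals the last matching model's family, else acc
lemma pv_inner_eq (ms : List String) (acc : Option String) :
    ms.foldl (fun (mf : Option String) model =>
        let model_lower := PySem.Str.lower model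
        match pvModelFamilyPatterns.find?
            (fun fp => fp.2.any (fun p => PySem.Str.isIn p model_lower)) with
        | some fp => some fp.1
        | none => mf) acc
      = (ms.reverse.findSome? pvFamilyOf).or acc := by
  induction ms generalizing acc with
  | nil => simp
  | cons m ms ih =>
    have hfam : pvFamilyOf m
        = (pvModelFamilyPatterns.find?
            (fun fp => fp.2.any (fun p => PySem.Str.isIn p (PySem.Str.lower m)))).map Prod.fst := rfl
    simp only [List.foldl_cons, List.reverse_cons, List.findSome?_append, ih]
    have hstep :
        (match pvModelFamilyPatterns.find?
            (fun fp => fp.2.any (fun p => PySem.Str.isIn p (PySem.Str.lower m))) with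
          | some fp => some fp.1
          | none => acc) = (pvFamilyOf m).or acc := by
      rw [hfam]
      cases pvModelFamilyPatterns.find?
          (fun fp => fp.2.any (fun p => PySem.Str.isIn p (PySem.Str.lower m))) <;> rfl
    rw [hstep]
    cases ms.reverse.findSome? pvFamilyOf <;> cases hm : pvFamilyOf m <;>
      simp only [List.findSome?_cons, List.findSome?_nil, hm, Option.or]

lemma pv_fold_eq (l : List (String × List String)) (d : PySem.Dict String String) :
    l.foldl
      (fun (d : PySem.Dict String String) cm =>
        let model_family :=
          cm.2.foldl (fun (mf : Option String) model =>
            let model_lower := PySem.Str.lower model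
            match pvModelFamilyPatterns.find?
                (fun fp => fp.2.any (fun p => PySem.Str.isIn p model_lower)) with
            | some fp => some fp.1
            | none => mf) none
        match model_family with
        | some f => d.insert cm.1 f
        | none => d.insert cm.1 "gemini") d
    = l.foldl
      (fun (d : PySem.Dict String String) cm =>
        d.insert cm.1 ((cm.2.reverse.findSome? pvFamilyOf).getD "gemini")) d := by
  induction l generalizing d with
  | nil => rfl
  | cons cm l ih =>
    simp only [List.foldl_cons]
    rw [pv_inner_eq]
    cases h : cm.2.reverse.findSome? pvFamilyOf <;> simp only [Option.or, Option.getD] <;>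
      exact ih _

-- ===== VERDICT (by name: the statement is the Claim_ definition above) =====
theorem preprocess_model_categories_spec : Claim_equal_preprocess_model_categories := by
  intro l _
  unfold Spec_preprocess_model_categories preprocess_model_categories preprocess_model_categories_alt
  rw [pv_fold_eq]
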